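-- pv_equiv track=rewrite | github.com/manuelafba/programacao-I | 1ª avaliação/lista 1 contagem/ex15.py | verificar_numeros
-- ===== SOURCE A (Python) =====
-- def verificar_numeros(lista_numeros):
--     cont = 0
--     lista_pares_idx_par = []
--
--     for idx, numero in enumerate(lista_numeros[1:]):
--         if numero % 2 == 0 and idx % 2 == 0:
--             cont += 1
--             lista_pares_idx_par.append(numero)
--
--     return lista_pares_idx_par, cont
-- ===== SOURCE B (Python) =====
-- def verificar_numeros(lista_numeros):
--     pares = [n for n in lista_numeros[1::2] if n % 2 == 0]
--     return pares, len(pares)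
-- ===== Notes on version B (the rewrite author's own statement) =====
-- stated objective: simpler
-- what changed: Replaces the enumerate-over-tail loop with its index-parity branch and explicit counter by a step-2 slice lista_numeros[1::2] filtered for even values, with the count derived as len(pares).
import Mathlib
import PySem

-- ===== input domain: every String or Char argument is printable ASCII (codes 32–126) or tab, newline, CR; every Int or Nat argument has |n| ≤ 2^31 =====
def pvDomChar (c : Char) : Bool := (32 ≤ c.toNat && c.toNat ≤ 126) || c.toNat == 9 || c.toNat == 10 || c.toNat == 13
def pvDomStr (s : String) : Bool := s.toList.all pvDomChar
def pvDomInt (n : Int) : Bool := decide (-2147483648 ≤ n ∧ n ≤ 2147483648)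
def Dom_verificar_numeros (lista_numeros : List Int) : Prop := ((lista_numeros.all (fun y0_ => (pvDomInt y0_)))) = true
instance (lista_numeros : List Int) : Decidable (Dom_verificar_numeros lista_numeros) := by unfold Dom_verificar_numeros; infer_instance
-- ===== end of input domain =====

-- B replaces the enumerate + index-parity loop by a step-2 slice filtered for even values (simpler).
-- ===== PORT A =====
def verificar_numeros (lista_numeros : List Int) : List Int × Int :=
  let st :=
    (PySem.List.enumerate (PySem.List.slice lista_numeros (some 1) none) 0).foldl
      (fun (st : Int × List Int) p =>
        if PySem.Int.mod p.2 2 = 0 ∧ PySem.Int.mod p.1 2 = 0 then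
          (st.1 + 1, st.2 ++ [p.2])
        else st)
      (0, [])
  (st.2, st.1)

-- ===== PORT B =====
-- lista_numeros[1::2] ported by hand as a two-step structural recursion
-- (start 1, step 2; exact for every list — indices are nonnegative and in range by construction)
def oddStride : List Int → List Int
  | [] => []
  | [_] => []
  | _ :: b :: t => b :: oddStride t

def verificar_numeros_alt (lista_numeros : List Int) : List Int × Int :=
  let pares := (oddStride lista_numeros).filter (fun n => PySem.Int.mod n 2 = 0)
  (pares, (pares.length : Int))

-- ===== PRECONDITION & SPEC =====
def Spec_verificar_numeros (lista_numeros : List Int) (out : List Int × Int) : Prop := out = verificar_numeros_alt lista_numeros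
instance (lista_numeros : List Int) (out : List Int × Int) : Decidable (Spec_verificar_numeros lista_numeros out) := by unfold Spec_verificar_numeros; infer_instance

-- ===== CLAIM (what is proved, stated in full; the proofs are below) =====
def Claim_equal_verificar_numeros : Prop := ∀ (lista_numeros : List Int), Dom_verificar_numeros lista_numeros → Spec_verificar_numeros lista_numeros (verificar_numeros lista_numeros)

-- ===== LEMMAS AND PROOFS =====

-- elements at even positions of a list
def evensOf : List Int → List Int
  | [] => []
  | [a] => [a]
  | a :: _ :: t => a :: evensOf t

theorem oddStride_cons (u : List Int) : ∀ (x : Int), oddStride (x :: u) = evensOf u := by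
  induction u using evensOf.induct with
  | case1 => intro x; simp [oddStride, evensOf]
  | case2 a => intro x; simp [oddStride, evensOf]
  | case3 a b t ih => intro x; simp [oddStride, evensOf, ih]

theorem fold_lem (u : List Int) : ∀ (s c : Int) (acc : List Int), PySem.Int.mod s 2 = 0 →
    (PySem.List.enumerate u s).foldl
      (fun (st : Int × List Int) p =>
        if PySem.Int.mod p.2 2 = 0 ∧ PySem.Int.mod p.1 2 = 0 then
          (st.1 + 1, st.2 ++ [p.2])
        else st)
      (c, acc)
    = (c + (((evensOf u).filter (fun n => PySem.Int.mod n 2 = 0)).length : Int),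
       acc ++ (evensOf u).filter (fun n => PySem.Int.mod n 2 = 0)) := by
  induction u using evensOf.induct with
  | case1 => intro s c acc hs; simp [PySem.List.enumerate, evensOf]
  | case2 a =>
    intro s c acc hs
    have hsd : (2:Int) ∣ s := by simpa using hs
    by_cases ha : (2:Int) ∣ a
    · simp [PySem.List.enumerate, evensOf, ha, hsd]
    · simp [PySem.List.enumerate, evensOf, ha]
  | case3 a b t ih =>
    intro s c acc hs
    have hs1 : ¬ PySem.Int.mod (s + 1) 2 = 0 := by
      simp only [PySem.Int.mod_eq_zero_iff_dvd]
      simp only [PySem.Int.mod_eq_zero_iff_dvd] at hs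
      omega
    have hs2 : PySem.Int.mod (s + 1 + 1) 2 = 0 := by
      simp only [PySem.Int.mod_eq_zero_iff_dvd]
      simp only [PySem.Int.mod_eq_zero_iff_dvd] at hs
      omega
    simp only [PySem.List.enumerate_cons, List.foldl_cons]
    by_cases ha : PySem.Int.mod a 2 = 0
    · rw [if_neg (fun h => hs1 h.2), if_pos ⟨ha, hs⟩, ih _ _ _ hs2]
      have had : (2:Int) ∣ a := by simpa using ha
      simp [evensOf, had]
      ring
    · rw [if_neg (fun h => hs1 h.2), if_neg (fun h => ha h.1), ih _ _ _ hs2]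
      have had : ¬ (2:Int) ∣ a := by simpa using ha
      simp [evensOf, had]

-- ===== VERDICT (by name: the statement is the Claim_ definition above) =====
theorem verificar_numeros_spec : Claim_equal_verificar_numeros := by
  intro l _
  unfold Spec_verificar_numeros verificar_numeros verificar_numeros_alt
  rw [PySem.List.slice_from_one]
  rw [fold_lem l.tail 0 0 [] (by simp [PySem.Int.mod])]
  cases l with
  | nil => simp [oddStride, evensOf]
  | cons x u => simp [oddStride_cons]
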